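-- pv_equiv track=rewrite | github.com/CommonRoad/drplanner | drplanner/planners/reactive_planner.py | join_method_lines
-- ===== SOURCE A (Python) =====
-- def join_method_lines(lines):
--     methods = []
--     current_method = ""
--
--     for line in lines:
--         if line.strip().startswith("def") and current_method:
--             methods.append(current_method)
--             current_method = ""
--         current_method += line + '\n'
--
--     if current_method:
--         methods.append(current_method)
--
--     return methods
-- ===== SOURCE B (Python) =====
-- def join_method_lines(lines):
--     # Group-at-a-time: each outer step takes the group's first line plus the
--     # run of following non-def lines, renders that slice, and moves on.
--     methods = []
--     i = 0
--     n = len(lines)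
--     while i < n:
--         j = i + 1
--         while j < n and not lines[j].strip().startswith("def"):
--             j += 1
--         methods.append(''.join(l + '\n' for l in lines[i:j]))
--         i = j
--     return methods
-- ===== Notes on version B (the rewrite author's own statement) =====
-- stated objective: alternative
-- what changed: B replaces A's single-pass string accumulator with flush-before-def logic by a two-level group-at-a-time scan: the outer loop takes each group's first line, the inner loop extends it through the following non-def lines, and the slice is rendered with ''.join at once.
import Mathlib
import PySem

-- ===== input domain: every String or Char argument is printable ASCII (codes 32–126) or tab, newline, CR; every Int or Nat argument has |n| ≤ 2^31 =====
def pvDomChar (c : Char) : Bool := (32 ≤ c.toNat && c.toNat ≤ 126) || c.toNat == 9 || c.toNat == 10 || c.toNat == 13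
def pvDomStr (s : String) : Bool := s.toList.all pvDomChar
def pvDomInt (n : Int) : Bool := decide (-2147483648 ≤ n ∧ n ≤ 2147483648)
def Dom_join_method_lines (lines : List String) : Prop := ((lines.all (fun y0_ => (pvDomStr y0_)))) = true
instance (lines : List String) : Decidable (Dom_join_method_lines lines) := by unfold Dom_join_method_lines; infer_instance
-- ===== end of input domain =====

-- B groups the lines one method at a time (outer step per group, inner scan of
-- its non-def body lines, rendered at once) instead of A's single-pass string
-- accumulator with flush-before-def; objective: alternative decomposition, same cost.

-- ===== PORT A =====
-- the 'def'-line test both Pythons write as line.strip().startswith("def")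
def jmlIsDef (line : String) : Bool := PySem.Str.startswith (PySem.Str.strip line) "def"

-- one loop step of A: flush the current method before a def line, then append the line
def jmlStepA (st : List String × String) (line : String) : List String × String :=
  let st1 := if jmlIsDef line && st.2 != "" then (st.1 ++ [st.2], "") else st
  (st1.1, st1.2 ++ line ++ "\n")

def join_method_lines (lines : List String) : List String :=
  let st := lines.foldl jmlStepA ([], "")
  if st.2 != "" then st.1 ++ [st.2] else st.1

-- ===== PORT B =====
-- ''.join(l + '\n' for l in chunk), rendered element by element (exact)
def jmlRender : List String → String
  | [] => ""
  | l :: t => l ++ "\n" ++ jmlRender t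

-- B's outer loop over the remaining suffix lines[i:]: the inner scan for the
-- next def line is the takeWhile/dropWhile split of the lines after the head
def join_method_lines_alt : List String → List String
  | [] => []
  | l :: ls =>
      jmlRender (l :: ls.takeWhile (fun x => !jmlIsDef x)) ::
        join_method_lines_alt (ls.dropWhile (fun x => !jmlIsDef x))
  termination_by ys => ys.length
  decreasing_by
    have := List.length_dropWhile_le (fun x => !jmlIsDef x) ls
    simp only [List.length_cons]
    omega

-- ===== PRECONDITION & SPEC =====
def Spec_join_method_lines (lines : List String) (out : List String) : Prop := out = join_method_lines_alt lines
instance (lines : List String) (out : List String) : Decidable (Spec_join_method_lines lines out) := by unfold Spec_join_method_lines; infer_instance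

-- ===== CLAIM (what is proved, stated in full; the proofs are below) =====
def Claim_equal_join_method_lines : Prop := ∀ (lines : List String), Dom_join_method_lines lines → Spec_join_method_lines lines (join_method_lines lines)

-- ===== LEMMAS AND PROOFS =====

-- A's final 'if current_method: append' step
def jmlFinish (st : List String × String) : List String :=
  st.1 ++ (if st.2 != "" then [st.2] else [])

theorem jmlRender_ne (g : List String) (h : g ≠ []) : jmlRender g ≠ "" := by
  cases g with
  | nil => exact absurd rfl h
  | cons a t =>
    intro he
    have : (jmlRender (a :: t)).length = 0 := by rw [he]; rfl
    simp [jmlRender, String.length_append] at this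

theorem jmlRender_snoc (g : List String) (l : String) :
    jmlRender (g ++ [l]) = jmlRender g ++ (l ++ "\n") := by
  induction g with
  | nil => simp [jmlRender]
  | cons a t ih => simp [jmlRender, ih, String.append_assoc]

-- the invariant: with a nonempty current group g, finishing A's loop over ys
-- yields the flushed methods, then g extended by the next body, then B's groups
theorem jml_inv (ys : List String) : ∀ (ms g : List String), g ≠ [] →
    jmlFinish (ys.foldl jmlStepA (ms, jmlRender g)) =
      ms ++ jmlRender (g ++ ys.takeWhile (fun x => !jmlIsDef x)) ::
        join_method_lines_alt (ys.dropWhile (fun x => !jmlIsDef x)) := by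
  induction ys with
  | nil =>
    intro ms g hg
    simp [jmlFinish, join_method_lines_alt, jmlRender_ne g hg]
  | cons l ys ih =>
    intro ms g hg
    have hne : (jmlRender g != "") = true := by
      simpa using jmlRender_ne g hg
    rw [List.foldl_cons]
    by_cases hd : jmlIsDef l = true
    · have hstep : jmlStepA (ms, jmlRender g) l = (ms ++ [jmlRender g], jmlRender [l]) := by
        simp [jmlStepA, hd, hne, jmlRender]
      rw [hstep, ih (ms ++ [jmlRender g]) [l] (by simp)]
      simp [List.takeWhile, List.dropWhile, hd, join_method_lines_alt]
    · have hstep : jmlStepA (ms, jmlRender g) l = (ms, jmlRender (g ++ [l])) := by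
        simp [jmlStepA, hd, jmlRender_snoc, String.append_assoc]
      rw [hstep, ih ms (g ++ [l]) (by simp)]
      simp [List.takeWhile, List.dropWhile, hd, List.append_assoc]

theorem jml_main (lines : List String) : join_method_lines lines = join_method_lines_alt lines := by
  cases lines with
  | nil => simp [join_method_lines, join_method_lines_alt]
  | cons l ls =>
    have hfin : ∀ st : List String × String,
        (if st.2 != "" then st.1 ++ [st.2] else st.1) = jmlFinish st := by
      intro st; by_cases hc : st.2 = "" <;> simp [jmlFinish, hc]
    have hstep : jmlStepA ([], "") l = ([], jmlRender [l]) := by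
      simp [jmlStepA, jmlRender]
    simp only [join_method_lines, List.foldl_cons, hstep, hfin]
    rw [jml_inv ls [] [l] (by simp)]
    simp [join_method_lines_alt]

-- ===== VERDICT (by name: the statement is the Claim_ definition above) =====
theorem join_method_lines_spec : Claim_equal_join_method_lines := by
  intro lines _
  unfold Spec_join_method_lines
  exact jml_main lines
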